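-- pv_equiv track=rewrite | github.com/knome7337/blockchain_job_tracker | modules/module_0_directory.py | _generate_compound_queries
-- ===== SOURCE A (Python) =====
-- from typing import List, Dict, Optional
--
-- def _generate_compound_queries(term_sets: List[List[str]], max_combinations: int = 10) -> List[str]:
--     """Generate compound queries from multiple term sets"""
--     queries = []
--     import itertools
--
--     for combo in itertools.product(*term_sets):
--         if len(queries) >= max_combinations:
--             break
--         query = ' '.join(combo)
--         queries.append(query)
--
--     return queries
-- ===== SOURCE B (Python) =====
-- def _generate_compound_queries(term_sets, max_combinations=10):
--     """Generate compound queries by decoding combination indices in mixed radix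
--     (last term set varies fastest, matching itertools.product order)."""
--     total = 1
--     for ts in term_sets:
--         total *= len(ts)
--     n = min(max_combinations, total)
--     queries = []
--     for i in range(n):
--         parts = []
--         rem = i
--         for ts in reversed(term_sets):
--             rem, j = divmod(rem, len(ts))
--             parts.append(ts[j])
--         parts.reverse()
--         queries.append(' '.join(parts))
--     return queries
-- ===== Notes on version B (the rewrite author's own statement) =====
-- stated objective: alternative
-- what changed: B replaces the itertools.product iterator with arithmetic: it computes the total number of combinations, takes n = min(max_combinations, total), and decodes each index 0..n-1 into one term per set by mixed-radix divmod (last set fastest), so no product list/iterator is ever materialised.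
import Mathlib
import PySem

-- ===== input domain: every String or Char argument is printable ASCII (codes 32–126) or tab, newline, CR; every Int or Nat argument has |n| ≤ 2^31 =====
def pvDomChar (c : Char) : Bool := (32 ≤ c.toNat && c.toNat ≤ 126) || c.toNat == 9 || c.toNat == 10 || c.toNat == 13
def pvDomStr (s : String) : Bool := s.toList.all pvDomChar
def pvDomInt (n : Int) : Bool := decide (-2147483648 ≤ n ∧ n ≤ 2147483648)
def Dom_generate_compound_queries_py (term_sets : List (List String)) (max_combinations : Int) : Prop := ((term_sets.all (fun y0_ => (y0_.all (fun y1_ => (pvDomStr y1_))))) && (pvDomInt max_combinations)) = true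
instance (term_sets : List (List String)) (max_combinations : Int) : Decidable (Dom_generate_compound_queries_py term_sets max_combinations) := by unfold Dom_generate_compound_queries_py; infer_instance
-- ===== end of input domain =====

-- B replaces the lazy itertools.product enumeration with mixed-radix index decoding; same cost, no product materialised (objective: alternative).

-- ===== PORT A =====
-- itertools.product(*term_sets) in its order (last set varies fastest)
def pyProduct : List (List String) → List (List String)
  | [] => [[]]
  | t :: rest => t.flatMap (fun x => (pyProduct rest).map (x :: ·))

-- the for-loop with its break condition checked before each append
def loopA (m : Int) : List String → List (List String) → List String
  | queries, [] => queries
  | queries, c :: cs =>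
    if (queries.length : Int) ≥ m then queries
    else loopA m (queries ++ [PySem.Str.join " " c]) cs

def generate_compound_queries_py (term_sets : List (List String)) (max_combinations : Int) : List String :=
  loopA max_combinations [] (pyProduct term_sets)

-- ===== PORT B =====
-- transliteration of Source B: total product of lengths, n = min(max, total), decode each
-- i by divmod over reversed(term_sets) then reverse the parts.  ts[j] is ported as
-- getD with default "" — exact here since j = rem % len(ts) is always in range when
-- the i-loop runs (total > 0 forces every len > 0).
def generate_compound_queries_py_alt (term_sets : List (List String)) (max_combinations : Int) : List String :=
  let total : Int := term_sets.foldl (fun a t => a * (t.length : Int)) 1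
  let n := min max_combinations total
  (PySem.List.pyRange 0 n 1).map (fun i =>
    let st := term_sets.reverse.foldl
      (fun (p : Int × List String) t =>
        (PySem.Int.floordiv p.1 (t.length : Int),
         p.2 ++ [t.getD (PySem.Int.mod p.1 (t.length : Int)).toNat ""]))
      (i, ([] : List String))
    PySem.Str.join " " st.2.reverse)

-- ===== PRECONDITION & SPEC =====
def Spec_generate_compound_queries_py (term_sets : List (List String)) (max_combinations : Int) (out : List String) : Prop := out = generate_compound_queries_py_alt term_sets max_combinations
instance (term_sets : List (List String)) (max_combinations : Int) (out : List String) : Decidable (Spec_generate_compound_queries_py term_sets max_combinations out) := by unfold Spec_generate_compound_queries_py; infer_instance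

-- ===== CLAIM (what is proved, stated in full; the proofs are below) =====
def Claim_equal_generate_compound_queries_py : Prop := ∀ (term_sets : List (List String)) (max_combinations : Int), Dom_generate_compound_queries_py term_sets max_combinations → Spec_generate_compound_queries_py term_sets max_combinations (generate_compound_queries_py term_sets max_combinations)

-- ===== LEMMAS AND PROOFS =====

-- number of combinations, as a Nat
def pNat (ts : List (List String)) : Nat := (ts.map List.length).prod

-- proof-side recursive form of B's inner divmod fold
def dRec : List (List String) → Int → Int × List String
  | [], i => (i, [])
  | t :: r, i =>
    let p := dRec r i
    (PySem.Int.floordiv p.1 (t.length : Int),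
     p.2 ++ [t.getD (PySem.Int.mod p.1 (t.length : Int)).toNat ""])

theorem pNat_cons (t : List String) (r : List (List String)) :
    pNat (t :: r) = t.length * pNat r := by simp [pNat]

theorem length_pyProduct (ts : List (List String)) :
    (pyProduct ts).length = pNat ts := by
  induction ts with
  | nil => simp [pyProduct, pNat]
  | cons t r ih =>
    simp [pyProduct, pNat_cons, ih, List.length_flatMap,
      List.map_const', List.sum_replicate, smul_eq_mul]

theorem total_eq_pNat (ts : List (List String)) (a : Int) :
    ts.foldl (fun a t => a * (t.length : Int)) a = a * (pNat ts : Int) := by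
  induction ts generalizing a with
  | nil => simp [pNat]
  | cons t r ih =>
    simp only [List.foldl_cons, ih, pNat_cons]
    push_cast
    ring

theorem foldl_reverse_eq_dRec (ts : List (List String)) (i : Int) (parts : List String) :
    ts.reverse.foldl
      (fun (p : Int × List String) t =>
        (PySem.Int.floordiv p.1 (t.length : Int),
         p.2 ++ [t.getD (PySem.Int.mod p.1 (t.length : Int)).toNat ""]))
      (i, parts)
    = ((dRec ts i).1, parts ++ (dRec ts i).2) := by
  induction ts generalizing parts with
  | nil => simp [dRec]
  | cons t r ih =>
    simp only [List.reverse_cons, List.foldl_append, ih, List.foldl_cons, List.foldl_nil, dRec]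
    simp [List.append_assoc]

theorem flatMap_block (t : List String) (L : List (List String)) (j : Nat)
    (hB : 0 < L.length) (hj : j < t.length * L.length) :
    (t.flatMap (fun x => L.map (x :: ·))).getD j []
      = t.getD (j / L.length) "" :: L.getD (j % L.length) [] := by
  induction t generalizing j with
  | nil => simp at hj
  | cons x t' ih =>
    rw [List.length_cons, Nat.succ_mul] at hj
    simp only [List.flatMap_cons]
    by_cases h : j < L.length
    · rw [List.getD_append _ _ _ _ (by simpa using h)]
      rw [List.getD_eq_getElem _ _ (by simpa using h), List.getElem_map]
      rw [Nat.div_eq_of_lt h, Nat.mod_eq_of_lt h]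
      simp [List.getElem?_eq_getElem h]
    · push_neg at h
      rw [List.getD_append_right _ _ _ _ (by simpa using h)]
      simp only [List.length_map]
      obtain ⟨P, hP⟩ : ∃ P, t'.length * L.length = P := ⟨_, rfl⟩
      rw [hP] at hj
      rw [ih (j - L.length) (by omega)]
      have h1 : (j - L.length) / L.length = j / L.length - 1 := by
        rcases Nat.exists_eq_add_of_le h with ⟨k, rfl⟩
        rw [Nat.add_sub_cancel_left, Nat.add_div_left _ hB, Nat.add_sub_cancel]
      have h2 : (j - L.length) % L.length = j % L.length := by
        rcases Nat.exists_eq_add_of_le h with ⟨k, rfl⟩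
        rw [Nat.add_sub_cancel_left, Nat.add_mod_left]
      have h3 : 1 ≤ j / L.length := (Nat.one_le_div_iff hB).mpr h
      rw [h1, h2]
      congr 1
      rcases Nat.exists_eq_add_of_le h3 with ⟨k, hk⟩
      rw [hk, Nat.add_comm 1 k]
      simp

theorem dRec_spec (ts : List (List String)) (i : Nat) (hP : 0 < pNat ts) :
    (dRec ts (i : Int)).1 = ((i / pNat ts : Nat) : Int)
    ∧ (dRec ts (i : Int)).2.reverse = (pyProduct ts).getD (i % pNat ts) [] := by
  induction ts generalizing i with
  | nil => simp [dRec, pNat, pyProduct]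
  | cons t r ih =>
    rw [pNat_cons] at hP ⊢
    have hPr : 0 < pNat r := by
      by_contra h
      simp only [Nat.pos_iff_ne_zero, ne_eq, not_not] at h
      simp [h] at hP
    have hlt : 0 < t.length := by
      by_contra h
      simp only [Nat.pos_iff_ne_zero, ne_eq, not_not] at h
      simp [h] at hP
    obtain ⟨ih1, ih2⟩ := ih i hPr
    have hb := flatMap_block t (pyProduct r) (i % (t.length * pNat r))
      (by rw [length_pyProduct]; exact hPr)
      (by rw [length_pyProduct]; exact Nat.mod_lt _ hP)
    rw [length_pyProduct] at hb
    constructor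
    · show PySem.Int.floordiv (dRec r i).1 (t.length : Int) = _
      rw [ih1, PySem.Int.floordiv_natCast]
      rw [Nat.div_div_eq_div_mul, Nat.mul_comm (pNat r) t.length]
    · show ((dRec r i).2 ++ [t.getD (PySem.Int.mod (dRec r i).1 (t.length : Int)).toNat ""]).reverse = _
      rw [ih1, PySem.Int.mod_natCast, Int.toNat_natCast, List.reverse_append]
      simp only [List.reverse_singleton, List.singleton_append, ih2]
      show _ = (pyProduct (t :: r)).getD (i % (t.length * pNat r)) []
      have e1 : i % (t.length * pNat r) / pNat r = i / pNat r % t.length := by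
        rw [Nat.mul_comm, Nat.mod_mul_right_div_self]
      have e2 : i % (t.length * pNat r) % pNat r = i % pNat r :=
        Nat.mod_mod_of_dvd i (dvd_mul_left (pNat r) t.length)
      rw [e1, e2] at hb
      rw [show pyProduct (t :: r) = t.flatMap (fun x => (pyProduct r).map (x :: ·)) from rfl, hb]

theorem loopA_eq_take (m : Int) (cs : List (List String)) (qs : List String) :
    loopA m qs cs = qs ++ ((cs.map (PySem.Str.join " ")).take (m - qs.length).toNat) := by
  induction cs generalizing qs with
  | nil => simp [loopA]
  | cons c cs ih =>
    rw [loopA]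
    by_cases h : (qs.length : Int) ≥ m
    · rw [if_pos h]
      have : (m - (qs.length : Int)).toNat = 0 := by omega
      simp [this]
    · rw [if_neg h]
      push_neg at h
      rw [ih]
      obtain ⟨k, hk⟩ : ∃ k, (m - (qs.length : Int)).toNat = k + 1 :=
        ⟨(m - (qs.length : Int) - 1).toNat, by omega⟩
      have hk' : (m - ((qs ++ [PySem.Str.join " " c]).length : Int)).toNat = k := by
        simp; omega
      rw [hk', hk]
      simp [List.append_assoc]

theorem alt_eq (ts : List (List String)) (m : Int) :
    generate_compound_queries_py_alt ts m =
      (List.range (min m (pNat ts : Int)).toNat).map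
        (fun k => PySem.Str.join " " ((pyProduct ts).getD k [])) := by
  simp only [generate_compound_queries_py_alt]
  rw [total_eq_pNat ts 1, one_mul, PySem.List.pyRange_one, sub_zero, List.map_map]
  apply List.map_congr_left
  intro k hk
  rw [List.mem_range] at hk
  have hkP : k < pNat ts := by omega
  have hP : 0 < pNat ts := by omega
  simp only [Function.comp_apply, zero_add]
  rw [foldl_reverse_eq_dRec, List.nil_append, (dRec_spec ts k hP).2, Nat.mod_eq_of_lt hkP]

theorem a_eq (ts : List (List String)) (m : Int) :
    generate_compound_queries_py ts m =
      (List.range (min m (pNat ts : Int)).toNat).map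
        (fun k => PySem.Str.join " " ((pyProduct ts).getD k [])) := by
  unfold generate_compound_queries_py
  rw [loopA_eq_take]
  simp only [List.nil_append, List.length_nil, Nat.cast_zero, sub_zero]
  apply List.ext_getElem
  · simp only [List.length_take, List.length_map, length_pyProduct, List.length_range]
    omega
  · intro i h1 h2
    simp only [List.length_take, List.length_map, length_pyProduct] at h1
    have hiP : i < pNat ts := by omega
    simp only [List.getElem_take, List.getElem_map, List.getElem_range]
    congr 1
    rw [List.getD_eq_getElem _ _ (by rw [length_pyProduct]; exact hiP)]

-- ===== VERDICT (by name: the statement is the Claim_ definition above) =====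
theorem generate_compound_queries_py_spec : Claim_equal_generate_compound_queries_py := by
  intro ts m _
  show generate_compound_queries_py ts m = generate_compound_queries_py_alt ts m
  rw [a_eq, alt_eq]
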